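-- pv_equiv track=rewrite | github.com/KevinPalaciosQ/-LFP-P2_201902278 | AnalizadorLexico.py | AutomataFinitoDecimal
-- ===== SOURCE A (Python) =====
-- def AutomataFinitoDecimal(caracter):
--         EstadoAceptacion = [2]
--         MiEstado = 0
--         for abc in caracter:
--             if MiEstado == 0:
--                 if abc.isdigit():
--                     MiEstado = 1
--                 else:
--                     MiEstado = -1
--             elif MiEstado == 1:
--                 if abc.isdigit():
--                     MiEstado = 1
--                 elif abc == ".":
--                     MiEstado = 2
--                 else:
--                     MiEstado =-1
--             elif MiEstado == 2:
--                 if abc.isdigit():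
--                     MiEstado = 2
--                 else:
--                     MiEstado = -1
--             elif MiEstado ==-1:
--                 return False
--         return MiEstado in EstadoAceptacion
-- ===== SOURCE B (Python) =====
-- def AutomataFinitoDecimal(caracter):
--     i = caracter.find('.')
--     if i == -1:
--         return False
--     before = caracter[:i]
--     after = caracter[i + 1:]
--     return before.isdigit() and (after == '' or after.isdigit())
-- ===== Notes on version B (the rewrite author's own statement) =====
-- stated objective: simpler
-- what changed: Replaced the four-state DFA loop by locating the first dot with str.find and checking that the segment before it is a nonempty digit string and the segment after it is empty or a digit string.
import Mathlib
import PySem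

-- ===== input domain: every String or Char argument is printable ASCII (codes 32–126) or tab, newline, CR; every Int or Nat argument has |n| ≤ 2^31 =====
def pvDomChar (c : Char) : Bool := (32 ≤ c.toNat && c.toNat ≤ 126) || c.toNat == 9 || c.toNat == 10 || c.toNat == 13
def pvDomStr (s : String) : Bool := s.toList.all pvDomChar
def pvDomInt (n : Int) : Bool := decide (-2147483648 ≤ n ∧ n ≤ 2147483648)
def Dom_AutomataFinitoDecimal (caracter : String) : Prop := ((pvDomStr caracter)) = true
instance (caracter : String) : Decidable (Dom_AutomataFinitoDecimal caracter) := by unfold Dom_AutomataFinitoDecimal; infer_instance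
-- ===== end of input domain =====

-- B replaces A's four-state DFA loop by one str.find for the dot plus per-segment digit checks; objective: simpler.

-- ===== PORT A =====
-- the for-loop over the characters, state MiEstado : Int, early 'return False' from state -1
def AutomataFinitoDecimalLoop : List Char → Int → Bool
  | [], s => [(2 : Int)].contains s
  | c :: cs, s =>
    if s = 0 then
      AutomataFinitoDecimalLoop cs (if PySem.Chars.isdigit c then 1 else -1)
    else if s = 1 then
      AutomataFinitoDecimalLoop cs
        (if PySem.Chars.isdigit c then 1 else if c = '.' then 2 else -1)
    else if s = 2 then
      AutomataFinitoDecimalLoop cs (if PySem.Chars.isdigit c then 2 else -1)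
    else if s = -1 then false
    else AutomataFinitoDecimalLoop cs s

def AutomataFinitoDecimal (caracter : String) : Bool :=
  AutomataFinitoDecimalLoop caracter.toList 0

-- ===== PORT B =====
def AutomataFinitoDecimal_alt (caracter : String) : Bool :=
  let i := PySem.Str.find caracter "."
  if i = -1 then false
  else
    let before := PySem.Str.slice caracter none (some i)
    let after := PySem.Str.slice caracter (some (i + 1)) none
    PySem.Str.strIsdigit before && (after == "" || PySem.Str.strIsdigit after)

-- ===== PRECONDITION & SPEC =====
def Spec_AutomataFinitoDecimal (caracter : String) (out : Bool) : Prop := out = AutomataFinitoDecimal_alt caracter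
instance (caracter : String) (out : Bool) : Decidable (Spec_AutomataFinitoDecimal caracter out) := by unfold Spec_AutomataFinitoDecimal; infer_instance

-- ===== CLAIM (what is proved, stated in full; the proofs are below) =====
def Claim_equal_AutomataFinitoDecimal : Prop := ∀ (caracter : String), Dom_AutomataFinitoDecimal caracter → Spec_AutomataFinitoDecimal caracter (AutomataFinitoDecimal caracter)

-- ===== LEMMAS AND PROOFS =====

-- canonical truth condition: one or more digits, a dot, then zero or more digits
def PAccept (l : List Char) : Prop :=
  ∃ ds es, l = ds ++ '.' :: es ∧ ds ≠ [] ∧ ds.all PySem.Chars.isdigit ∧ es.all PySem.Chars.isdigit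

theorem loopA_neg (l : List Char) : AutomataFinitoDecimalLoop l (-1) = false := by
  cases l <;> simp [AutomataFinitoDecimalLoop]

theorem loopA_two (l : List Char) : AutomataFinitoDecimalLoop l 2 = l.all PySem.Chars.isdigit := by
  induction l with
  | nil => simp [AutomataFinitoDecimalLoop]
  | cons c cs ih =>
    by_cases h : PySem.Chars.isdigit c = true <;>
      simp [AutomataFinitoDecimalLoop, h, ih, loopA_neg]

theorem loopA_one_iff (l : List Char) :
    AutomataFinitoDecimalLoop l 1 = true ↔
      ∃ ds es, l = ds ++ '.' :: es ∧ ds.all PySem.Chars.isdigit ∧ es.all PySem.Chars.isdigit := by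
  induction l with
  | nil =>
    simp [AutomataFinitoDecimalLoop]
  | cons c cs ih =>
    by_cases hd : PySem.Chars.isdigit c = true
    · rw [show AutomataFinitoDecimalLoop (c :: cs) 1 = AutomataFinitoDecimalLoop cs 1 by
        simp [AutomataFinitoDecimalLoop, hd]]
      rw [ih]
      constructor
      · rintro ⟨ds, es, rfl, hds, hes⟩
        exact ⟨c :: ds, es, rfl, by simp [hd, hds], hes⟩
      · rintro ⟨ds, es, heq, hds, hes⟩
        cases ds with
        | nil =>
          simp at heq
          have : PySem.Chars.isdigit '.' = true := heq.1 ▸ hd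
          simp [PySem.Chars.isdigit] at this
        | cons d ds' =>
          simp at heq
          obtain ⟨rfl, rfl⟩ := heq
          simp at hds
          exact ⟨ds', es, rfl, List.all_eq_true.mpr hds.2, hes⟩
    · by_cases hp : c = '.'
      · subst hp
        rw [show AutomataFinitoDecimalLoop ('.' :: cs) 1 = AutomataFinitoDecimalLoop cs 2 by
          simp [AutomataFinitoDecimalLoop, hd]]
        rw [loopA_two]
        constructor
        · intro h; exact ⟨[], cs, rfl, by simp, h⟩
        · rintro ⟨ds, es, heq, hds, hes⟩
          cases ds with
          | nil => simp at heq; rw [heq]; exact hes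
          | cons d ds' =>
            simp at heq
            obtain ⟨rfl, rfl⟩ := heq
            simp [PySem.Chars.isdigit] at hds
      · rw [show AutomataFinitoDecimalLoop (c :: cs) 1 = AutomataFinitoDecimalLoop cs (-1) by
          simp [AutomataFinitoDecimalLoop, hd, hp]]
        rw [loopA_neg]
        simp only [Bool.false_eq_true, false_iff, not_exists]
        rintro ds es ⟨heq, hds, hes⟩
        cases ds with
        | nil => simp at heq; exact hp heq.1
        | cons d ds' =>
          simp at heq
          obtain ⟨rfl, rfl⟩ := heq
          simp [hd] at hds

theorem loopA_zero_iff (l : List Char) :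
    AutomataFinitoDecimalLoop l 0 = true ↔ PAccept l := by
  cases l with
  | nil =>
    simp [AutomataFinitoDecimalLoop, PAccept]
  | cons c cs =>
    by_cases hd : PySem.Chars.isdigit c = true
    · rw [show AutomataFinitoDecimalLoop (c :: cs) 0 = AutomataFinitoDecimalLoop cs 1 by
        simp [AutomataFinitoDecimalLoop, hd]]
      rw [loopA_one_iff]
      constructor
      · rintro ⟨ds, es, rfl, hds, hes⟩
        exact ⟨c :: ds, es, rfl, by simp, by simp [hd, hds], hes⟩
      · rintro ⟨ds, es, heq, hne, hds, hes⟩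
        cases ds with
        | nil => exact absurd rfl hne
        | cons d ds' =>
          simp at heq
          obtain ⟨rfl, rfl⟩ := heq
          simp at hds
          exact ⟨ds', es, rfl, List.all_eq_true.mpr hds.2, hes⟩
    · rw [show AutomataFinitoDecimalLoop (c :: cs) 0 = AutomataFinitoDecimalLoop cs (-1) by
        simp [AutomataFinitoDecimalLoop, hd]]
      rw [loopA_neg]
      simp only [PAccept, Bool.false_eq_true, false_iff, not_exists]
      rintro ds es ⟨heq, hne, hds, hes⟩
      cases ds with
      | nil => exact hne rfl
      | cons d ds' =>
        simp at heq
        obtain ⟨rfl, rfl⟩ := heq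
        simp [hd] at hds

-- single-char find: an occurrence at j is exactly a dot at index j
theorem singleton_prefix_drop (l : List Char) (j : Nat) :
    ['.'] <+: l.drop j ↔ l[j]? = some '.' := by
  constructor
  · rintro ⟨t, ht⟩
    have h0 : (l.drop j)[0]? = some '.' := by rw [← ht]; rfl
    simpa using h0
  · intro h
    have hj : j < l.length := by
      by_contra hn
      rw [List.getElem?_eq_none (show l.length ≤ j by omega)] at h
      simp at h
    refine ⟨l.drop (j + 1), ?_⟩
    rw [List.drop_eq_getElem_cons hj]
    simp_all

theorem strIsdigit_iff (xs : List Char) :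
    PySem.Chars.strIsdigit xs = true ↔ xs ≠ [] ∧ xs.all PySem.Chars.isdigit = true := by
  simp [PySem.Chars.strIsdigit]

theorem altB_iff (l : List Char) :
    (let i := PySem.Chars.find l ['.']
     if i = -1 then false
     else
       PySem.Chars.strIsdigit (PySem.List.slice l none (some i)) &&
         (PySem.List.slice l (some (i + 1)) none == [] ||
          PySem.Chars.strIsdigit (PySem.List.slice l (some (i + 1)) none))) = true ↔
      PAccept l := by
  set i := PySem.Chars.find l ['.'] with hi
  by_cases h0 : i = -1
  · rw [if_pos h0]
    simp only [Bool.false_eq_true, false_iff]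
    rintro ⟨ds, es, rfl, hne, hds, hes⟩
    have : ¬ ['.'] <:+: ds ++ '.' :: es := (PySem.Chars.find_eq_neg_one_iff _ _).1 (hi ▸ h0)
    exact this ⟨ds, es, by simp⟩
  · have hnn : 0 ≤ i := by
      have := PySem.Chars.neg_one_le_find l ['.']
      rw [← hi] at this; omega
    have hle : i ≤ l.length := hi ▸ PySem.Chars.find_le_length l ['.']
    obtain ⟨hpre, hmin⟩ := PySem.Chars.find_spec (hi ▸ hnn)
    rw [← hi] at hpre hmin
    have hget : l[i.toNat]? = some '.' := (singleton_prefix_drop l i.toNat).1 hpre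
    have hlt : i.toNat < l.length := by
      by_contra hn
      rw [List.getElem?_eq_none (show l.length ≤ i.toNat by omega)] at hget
      simp at hget
    rw [if_neg h0]
    rw [PySem.List.slice_to l hnn, PySem.List.slice_from l (by omega : (0:Int) ≤ i + 1)]
    have htn : (i + 1).toNat = i.toNat + 1 := by omega
    rw [htn]
    have hgete : l[i.toNat] = '.' := by
      rw [List.getElem?_eq_getElem hlt] at hget
      exact Option.some.inj hget
    have hsplit : l = l.take i.toNat ++ '.' :: l.drop (i.toNat + 1) := by
      conv_lhs => rw [← List.take_append_drop i.toNat l]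
      rw [List.drop_eq_getElem_cons hlt, hgete]
    constructor
    · intro hb
      rw [Bool.and_eq_true, Bool.or_eq_true] at hb
      obtain ⟨hbefore, hafter⟩ := hb
      rw [strIsdigit_iff] at hbefore
      refine ⟨l.take i.toNat, l.drop (i.toNat + 1), hsplit, hbefore.1, hbefore.2, ?_⟩
      rcases hafter with hA | hA
      · rw [beq_iff_eq] at hA; simp [hA]
      · exact ((strIsdigit_iff _).1 hA).2
    · rintro ⟨ds, es, heq, hne, hds, hes⟩
      have hocc : ['.'] <+: l.drop ds.length := by
        rw [singleton_prefix_drop]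
        rw [heq]; simp
      have hnotlt : ¬ i.toNat < ds.length := by
        intro hlt'
        have hget' := hget
        rw [heq] at hget'
        rw [List.getElem?_append_left hlt'] at hget'
        have hmem : '.' ∈ ds := List.mem_of_getElem? hget'
        have := (List.all_eq_true.mp hds) '.' hmem
        simp [PySem.Chars.isdigit] at this
      have hnotgt : ¬ ds.length < i.toNat := fun hlt' => hmin ds.length hlt' hocc
      have hieq : i.toNat = ds.length := by omega
      have htake : l.take i.toNat = ds := by
        rw [heq, hieq, List.take_left]
      have hdrop : l.drop (i.toNat + 1) = es := by
        rw [heq, hieq]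
        rw [show ds.length + 1 = (ds ++ ['.']).length by simp]
        rw [show ds ++ '.' :: es = (ds ++ ['.']) ++ es by simp]
        rw [List.drop_left]
      rw [Bool.and_eq_true, Bool.or_eq_true]
      refine ⟨(strIsdigit_iff _).2 ⟨htake ▸ hne, htake ▸ hds⟩, ?_⟩
      cases es with
      | nil => left; rw [beq_iff_eq, hdrop]
      | cons e es' =>
        right
        rw [strIsdigit_iff, hdrop]
        exact ⟨by simp, hes⟩

-- (x == "") on String, moved to the toList side
theorem beq_empty (x : String) : (x == "") = (x.toList == ([] : List Char)) := by
  rw [Bool.eq_iff_iff, beq_iff_eq, beq_iff_eq]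
  exact ⟨fun h => h ▸ rfl, fun h => String.ext (by simpa using h)⟩

-- ===== VERDICT (by name: the statement is the Claim_ definition above) =====
theorem AutomataFinitoDecimal_spec : Claim_equal_AutomataFinitoDecimal := by
  intro caracter _
  unfold Spec_AutomataFinitoDecimal
  apply Bool.coe_iff_coe.mp
  rw [show AutomataFinitoDecimal caracter = AutomataFinitoDecimalLoop caracter.toList 0 from rfl]
  rw [loopA_zero_iff, ← altB_iff caracter.toList]
  unfold AutomataFinitoDecimal_alt
  simp only [PySem.Str.find_eq, PySem.Str.strIsdigit_eq, PySem.Str.toList_slice, beq_empty,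
    PySem.Chars.slice_eq_listSlice]
  rw [show (".".toList : List Char) = ['.'] from rfl]
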